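-- pv_equiv track=rewrite | github.com/tsuru7/algorithm-study | AtCoder/ABC/201-300/ABC273/C.py | solve
-- ===== SOURCE A (Python) =====
-- from bisect import bisect_left, bisect_right
-- from collections import defaultdict
--
-- def solve(n,a):
--     b = list(set(a))
--     b.sort()
--     count=defaultdict(int)
--     for i in range(n):
--         ai = a[i]
--         idx = bisect_right(b, ai)
--         num_lt = len(b) - idx
--         count[num_lt] += 1
--     ans = [0 for _ in range(n)]
--     for k, v in count.items():
--         ans[k] = v
--     return ans
-- ===== SOURCE B (Python) =====
-- from collections import Counter
--
-- def solve(n, a):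
--     c = Counter(a[:n])
--     vals = sorted(set(a), reverse=True)
--     ans = [0] * n
--     for i in range(min(n, len(vals))):
--         ans[i] = c[vals[i]]
--     return ans
-- ===== Notes on version B (the rewrite author's own statement) =====
-- stated objective: simpler
-- what changed: Instead of bisecting each of the n prefix elements into the ascending distinct list and scattering a defaultdict into the answer, B builds a Counter of the prefix once and fills ans with a single direct pass over the descending distinct values (the value at descending index i has exactly i distinct larger values).
import Mathlib
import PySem

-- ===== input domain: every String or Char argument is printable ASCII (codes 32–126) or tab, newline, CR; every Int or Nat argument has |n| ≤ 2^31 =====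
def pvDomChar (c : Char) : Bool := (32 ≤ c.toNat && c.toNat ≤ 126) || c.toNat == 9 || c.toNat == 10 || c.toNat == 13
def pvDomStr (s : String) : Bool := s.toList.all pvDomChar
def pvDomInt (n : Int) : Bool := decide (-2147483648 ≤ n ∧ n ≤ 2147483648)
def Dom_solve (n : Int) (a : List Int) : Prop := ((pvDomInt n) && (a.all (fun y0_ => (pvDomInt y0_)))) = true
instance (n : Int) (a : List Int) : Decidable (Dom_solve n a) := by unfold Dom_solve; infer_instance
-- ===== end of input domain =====

-- B replaces A's per-element bisect loop + dict scatter with a prefix Counter and one pass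
-- over the descending distinct values (objective: simpler).

-- ===== PORT A =====
def solve (n : Int) (a : List Int) : List Int :=
  let b := PySem.List.sorted (PySem.Set.ofList a) (fun x => x)
  let count := (PySem.List.pyRange 0 n 1).foldl
    (fun d i =>
      let ai := PySem.List.pyGetD a i 0
      let idx := PySem.List.bisectRight b ai
      let numLt := PySem.List.len b - (idx : Int)
      d.modify numLt 0 (· + 1))
    PySem.Dict.empty
  let ans : List Int := (PySem.List.pyRange 0 n 1).map (fun _ => 0)
  count.items.foldl (fun acc kv => PySem.List.pySetD acc kv.1 kv.2) ans

-- ===== PORT B =====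
def solve_alt (n : Int) (a : List Int) : List Int :=
  let c := PySem.Dict.counter (PySem.List.slice a none (some n))
  let vals := PySem.List.sorted (PySem.Set.ofList a) (fun x => x) true
  let ans : List Int := PySem.List.pyRepeat [0] n
  (PySem.List.pyRange 0 (min n (PySem.List.len vals)) 1).foldl
    (fun acc i => PySem.List.pySetD acc i (c.getD (PySem.List.pyGetD vals i 0) 0)) ans

-- ===== PRECONDITION & SPEC =====
-- Pre_ excludes exactly the inputs on which A raises IndexError: n > len(a) (a[i] out of
-- range), or some element of a[:n] having at least n distinct larger values in a (the
-- scatter ans[k] = v is then out of range).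
def Pre_solve (n : Int) (a : List Int) : Prop :=
  n ≤ (a.length : Int) ∧
  ∀ x ∈ a.take n.toNat, (((PySem.Set.ofList a).filter (fun y => x < y)).length : Int) < n
instance (n : Int) (a : List Int) : Decidable (Pre_solve n a) := by unfold Pre_solve; infer_instance
def pvWitness_solve : Int × List Int := (3, [1, 5, 5])

def Spec_solve (n : Int) (a : List Int) (out : List Int) : Prop := out = solve_alt n a
instance (n : Int) (a : List Int) (out : List Int) : Decidable (Spec_solve n a out) := by unfold Spec_solve; infer_instance

-- ===== CLAIM (what is proved, stated in full; the proofs are below) =====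
def Claim_equal_solve : Prop := ∀ (n : Int) (a : List Int), Dom_solve n a → Pre_solve n a → Spec_solve n a (solve n a)

-- ===== LEMMAS AND PROOFS =====
-- scatter lemmas
lemma scatter_length (l : List (Int × Int)) (init : List Int) :
    (l.foldl (fun acc kv => PySem.List.pySetD acc kv.1 kv.2) init).length = init.length := by
  induction l generalizing init with
  | nil => rfl
  | cons p t ih => simpa [PySem.List.length_pySetD] using ih (PySem.List.pySetD init p.1 p.2)

lemma scatter_getElem? (l : List (Int × Int)) (init : List Int)
    (hnd : (l.map Prod.fst).Nodup) (hpos : ∀ p ∈ l, 0 ≤ p.1)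
    (j : Nat) (hj : j < init.length) :
    (l.foldl (fun acc kv => PySem.List.pySetD acc kv.1 kv.2) init)[j]? =
      some (((PySem.Dict.mk l).get? (j : Int)).getD init[j]) := by
  induction l generalizing init with
  | nil => simp [PySem.Dict.get?, hj]
  | cons p t ih =>
    obtain ⟨k, v⟩ := p
    have hk0 : 0 ≤ k := hpos (k, v) (by simp)
    have hset : PySem.List.pySetD init k v = init.set k.toNat v :=
      PySem.List.pySetD_of_nonneg init v hk0
    have hlen : j < (PySem.List.pySetD init k v).length := by
      rwa [PySem.List.length_pySetD]
    have := ih (PySem.List.pySetD init k v)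
      (by simpa using (List.nodup_cons.mp (by simpa using hnd)).2)
      (fun p hp => hpos p (List.mem_cons_of_mem _ hp)) hlen
    rw [List.foldl_cons, this, PySem.Dict.get?_mk_cons]
    by_cases hkj : k = (j : Int)
    · have hjk : k.toNat = j := by omega
      have hkmem : k ∉ t.map Prod.fst := (List.nodup_cons.mp (by simpa using hnd)).1
      have hnone : (PySem.Dict.mk t).get? ((j : Nat) : Int) = none := by
        rw [PySem.Dict.get?_eq_none_iff_not_mem_keys]
        simpa [PySem.Dict.keys, hkj] using hkmem
      simp [hkj, hnone, List.getElem_set_self]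
    · have hne : k.toNat ≠ j := by omega
      simp [hkj, hset, List.getElem_set_ne, hne]

lemma get?_mk_map (l : List Int) (g : Int → Int) (k : Int) :
    (PySem.Dict.mk (l.map (fun i => (i, g i)))).get? k =
      if k ∈ l then some (g k) else none := by
  induction l with
  | nil => simp [PySem.Dict.get?]
  | cons i t ih =>
    rw [List.map_cons, PySem.Dict.get?_mk_cons, ih]
    by_cases h : i = k
    · simp [h]
    · simp [h, Ne.symm h]

lemma bisect_strict (xs : List Int) (h : xs.Pairwise (· < ·)) (i : Nat) (hi : i < xs.length) :
    PySem.List.bisectRight xs xs[i] = i + 1 := by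
  obtain ⟨hle, hlo, hhi⟩ := PySem.List.bisectRight_spec xs xs[i] (h.imp le_of_lt)
  set r := PySem.List.bisectRight xs xs[i] with hr
  have hgt : ∀ p q (hp : p < xs.length) (hq : q < xs.length), p < q → xs[p] < xs[q] :=
    fun p q hp hq hpq => (List.pairwise_iff_getElem.mp h) p q hp hq hpq
  rcases lt_trichotomy r (i + 1) with hlt | heq | hgt'
  · exfalso
    have hri : r ≤ i := by omega
    exact lt_irrefl _ (hhi i hi hri)
  · exact heq
  · exfalso
    have hi1 : i + 1 < xs.length := by omega
    have := hlo (i + 1) hi1 (by omega)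
    exact absurd (hgt i (i+1) hi hi1 (by omega)) (by omega)

def ascD (a : List Int) : List Int := PySem.List.sorted (PySem.Set.ofList a) (fun x => x)

def nGt (a : List Int) (x : Int) : Int :=
  ((ascD a).length : Int) - (PySem.List.bisectRight (ascD a) x : Int)

lemma ascD_pairwise (a : List Int) : (ascD a).Pairwise (· < ·) :=
  PySem.List.sorted_ofList_pairwise_lt a

lemma mem_ascD (a : List Int) (x : Int) : x ∈ ascD a ↔ x ∈ a := by
  rw [ascD, PySem.List.mem_sorted, PySem.Set.mem_ofList]

lemma vals_eq (a : List Int) :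
    PySem.List.sorted (PySem.Set.ofList a) (fun x => x) true = (ascD a).reverse := by
  apply PySem.List.sorted_rev_eq_of_perm_of_pairwise_gt
  · exact (List.reverse_perm _).trans (PySem.List.sorted_perm _ _ _)
  · exact List.pairwise_reverse.mpr (ascD_pairwise a)

lemma nGt_spec (a : List Int) (x : Int) (hx : x ∈ a) :
    ∃ i : Nat, ∃ hi : i < (ascD a).length,
      x = (ascD a)[i] ∧ nGt a x = ((ascD a).length : Int) - (i + 1) := by
  obtain ⟨i, hi, hx'⟩ := List.mem_iff_getElem.mp ((mem_ascD a x).mpr hx)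
  refine ⟨i, hi, hx'.symm, ?_⟩
  rw [nGt, ← hx', bisect_strict (ascD a) (ascD_pairwise a) i hi]
  push_cast
  ring

lemma nGt_bounds (a : List Int) (x : Int) (hx : x ∈ a) :
    0 ≤ nGt a x ∧ nGt a x < ((ascD a).length : Int) := by
  obtain ⟨i, hi, -, he⟩ := nGt_spec a x hx
  constructor <;> [omega; omega]

lemma nGt_eq_iff (a : List Int) (x : Int) (hx : x ∈ a) (j : Nat)
    (hj : j < (ascD a).length) :
    nGt a x = (j : Int) ↔ x = (ascD a)[(ascD a).length - 1 - j] := by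
  obtain ⟨i, hi, hxi, he⟩ := nGt_spec a x hx
  have hnd : (ascD a).Nodup := (ascD_pairwise a).imp ne_of_lt
  constructor
  · intro h
    have hij : i = (ascD a).length - 1 - j := by omega
    subst hij
    exact hxi
  · intro h
    have heq : (ascD a)[i] = (ascD a)[(ascD a).length - 1 - j]'(by omega) :=
      hxi.symm.trans h
    have hij : i = (ascD a).length - 1 - j :=
      List.Nodup.getElem_inj_iff hnd |>.mp heq
    omega

lemma count_eq (n : Int) (a : List Int) (h0 : 0 ≤ n) (hn : n ≤ (a.length : Int)) :
    (PySem.List.pyRange 0 n 1).foldl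
      (fun d i => d.modify
        (PySem.List.len (ascD a) - (PySem.List.bisectRight (ascD a) (PySem.List.pyGetD a i 0) : Int))
        0 (· + 1))
      PySem.Dict.empty
    = PySem.Dict.counter ((a.take n.toNat).map (nGt a)) := by
  have hlenpre : (PySem.List.len (a.take n.toNat)) = n := by
    simp [PySem.List.len_eq, List.length_take]; omega
  have hswap : (PySem.List.pyRange 0 n 1).foldl
      (fun d i => d.modify
        (PySem.List.len (ascD a) - (PySem.List.bisectRight (ascD a) (PySem.List.pyGetD a i 0) : Int))
        0 (· + 1))
      (PySem.Dict.empty : PySem.Dict Int Int)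
    = (PySem.List.pyRange 0 n 1).foldl
      (fun d i => d.modify (nGt a (PySem.List.pyGetD (a.take n.toNat) i 0)) 0 (· + 1))
      (PySem.Dict.empty : PySem.Dict Int Int) := by
    apply PySem.List.foldl_congr_mem
    intro acc i hi
    obtain ⟨hi0, hin⟩ := (PySem.List.mem_pyRange_one).mp hi
    have hia : i < (a.length : Int) := lt_of_lt_of_le hin hn
    have hit : i < ((a.take n.toNat).length : Int) := by
      simp [List.length_take]; omega
    rw [PySem.List.pyGetD_eq_getElem a 0 hi0 hia,
        PySem.List.pyGetD_eq_getElem (a.take n.toNat) 0 hi0 hit,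
        List.getElem_take]
    simp [nGt, PySem.List.len_eq]
  refine hswap.trans ?_
  rw [show (PySem.List.pyRange 0 n 1) = PySem.List.pyRange 0 (PySem.List.len (a.take n.toNat)) 1 by rw [hlenpre]]
  have h2 := PySem.List.foldl_pyRange_pyGetD (a.take n.toNat) 0
       (fun d x => d.modify (nGt a x) 0 (· + 1)) (PySem.Dict.empty : PySem.Dict Int Int) (le_refl 0)
  simp only [Int.toNat_zero, List.drop_zero] at h2
  rw [h2, PySem.Dict.counter_eq_foldl]
  exact (List.foldl_map (f := nGt a) (g := fun d y => d.modify y 0 (· + 1))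
    (l := a.take n.toNat) (init := (PySem.Dict.empty : PySem.Dict Int Int))).symm

lemma solve_eq_solve_alt (n : Int) (a : List Int)
    (hn : n ≤ (a.length : Int)) :
    solve n a = solve_alt n a := by
  by_cases h0 : n ≤ 0
  · have hr : PySem.List.pyRange 0 n 1 = [] := PySem.List.pyRange_one_eq_nil h0
    have hr2 : ∀ m : Int, PySem.List.pyRange 0 (min n m) 1 = [] :=
      fun m => PySem.List.pyRange_one_eq_nil ((min_le_left _ _).trans h0)
    have hnt : n.toNat = 0 := by omega
    simp [solve, solve_alt, hr, hr2, PySem.List.pyRepeat_singleton, hnt, PySem.Dict.empty]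
  · have h0' : (0:Int) ≤ n := by omega
    -- A normal form
    have hinit : ((PySem.List.pyRange 0 n 1).map (fun _ => (0:Int))) = List.replicate n.toNat 0 := by
      rw [PySem.List.pyRange_one]
      simp [List.map_map, Function.comp_def]
    have hcount := count_eq n a h0' hn
    have hA : solve n a =
        (PySem.Dict.counter ((a.take n.toNat).map (nGt a))).items.foldl
          (fun acc kv => PySem.List.pySetD acc kv.1 kv.2)
          (List.replicate n.toNat 0) := by
      simp only [solve]
      rw [show PySem.List.sorted (PySem.Set.ofList a) (fun x => x) = ascD a from rfl]
      rw [hcount, hinit]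
    -- B normal form
    have hB : solve_alt n a =
        ((PySem.List.pyRange 0 (min n ((ascD a).length : Int)) 1).map
           (fun i => (i, (PySem.Dict.counter (a.take n.toNat)).getD
              (PySem.List.pyGetD ((ascD a).reverse) i 0) 0))).foldl
          (fun acc kv => PySem.List.pySetD acc kv.1 kv.2) (List.replicate n.toNat 0) := by
      simp only [solve_alt]
      rw [PySem.List.slice_to a h0', vals_eq a, PySem.List.pyRepeat_singleton]
      rw [show PySem.List.len ((ascD a).reverse) = ((ascD a).length : Int) by
        simp [PySem.List.len_eq]]
      exact (List.foldl_map
        (f := fun i => (i, (PySem.Dict.counter (a.take n.toNat)).getD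
            (PySem.List.pyGetD ((ascD a).reverse) i 0) 0))
        (g := fun acc kv => PySem.List.pySetD acc kv.1 kv.2)
        (l := PySem.List.pyRange 0 (min n ((ascD a).length : Int)) 1)
        (init := List.replicate n.toNat 0)).symm
    -- lengths
    have hlenA : (solve n a).length = n.toNat := by
      rw [hA, scatter_length, List.length_replicate]
    have hlenB : (solve_alt n a).length = n.toNat := by
      rw [hB, scatter_length, List.length_replicate]
    apply List.ext_getElem?
    intro j
    by_cases hj : j < n.toNat
    · have hndA : ((PySem.Dict.counter ((a.take n.toNat).map (nGt a))).items.map Prod.fst).Nodup := by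
        have h := PySem.Dict.nodup_keys_counter ((a.take n.toNat).map (nGt a))
        simpa [PySem.Dict.keys] using h
      have hposA : ∀ p ∈ (PySem.Dict.counter ((a.take n.toNat).map (nGt a))).items, 0 ≤ p.1 := by
        intro p hp
        have hk : p.1 ∈ (PySem.Dict.counter ((a.take n.toNat).map (nGt a))).keys :=
          PySem.Dict.mem_keys_of_mem_items _ hp
        rw [PySem.Dict.keys_counter] at hk
        obtain ⟨x, hx, hxe⟩ := List.mem_map.mp ((PySem.Set.mem_ofList _ _).mp hk)
        have := (nGt_bounds a x (List.mem_of_mem_take hx)).1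
        omega
      have hndB : (((PySem.List.pyRange 0 (min n ((ascD a).length : Int)) 1).map
           (fun i => (i, (PySem.Dict.counter (a.take n.toNat)).getD
              (PySem.List.pyGetD ((ascD a).reverse) i 0) 0))).map Prod.fst).Nodup := by
        simp only [List.map_map]
        simpa [Function.comp_def] using
          PySem.List.nodup_pyRange_one 0 (min n ((ascD a).length : Int))
      have hposB : ∀ p ∈ ((PySem.List.pyRange 0 (min n ((ascD a).length : Int)) 1).map
           (fun i => (i, (PySem.Dict.counter (a.take n.toNat)).getD
              (PySem.List.pyGetD ((ascD a).reverse) i 0) 0))), 0 ≤ p.1 := by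
        intro p hp
        obtain ⟨i, hi, rfl⟩ := List.mem_map.mp hp
        exact ((PySem.List.mem_pyRange_one).mp hi).1
      have hjA : j < (List.replicate n.toNat (0:Int)).length := by simp [hj]
      rw [hA, hB, scatter_getElem? _ _ hndA hposA j hjA,
          scatter_getElem? _ _ hndB hposB j hjA,
          show PySem.Dict.mk (PySem.Dict.counter ((a.take n.toNat).map (nGt a))).items
             = PySem.Dict.counter ((a.take n.toNat).map (nGt a)) from rfl,
          get?_mk_map, ← PySem.Dict.getD_eq_get?_getD, PySem.Dict.getD_counter]
      simp only [List.getElem_replicate]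
      by_cases hjM : ((j:Nat) : Int) < min n ((ascD a).length : Int)
      · have hjL : j < (ascD a).length := by
          have h1 : ((j:Nat):Int) < ((ascD a).length : Int) := lt_of_lt_of_le hjM (min_le_right _ _)
          exact_mod_cast h1
        have hmem : ((j:Nat):Int) ∈ PySem.List.pyRange 0 (min n ((ascD a).length : Int)) 1 :=
          (PySem.List.mem_pyRange_one).mpr ⟨by positivity, hjM⟩
        rw [if_pos hmem]
        have hrl : j < (ascD a).reverse.length := by simpa using hjL
        have hBval : PySem.List.pyGetD ((ascD a).reverse) ((j:Nat):Int) 0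
            = (ascD a)[(ascD a).length - 1 - j]'(by omega) := by
          rw [PySem.List.pyGetD_natCast, List.getD_eq_getElem _ _ hrl]
          exact List.getElem_reverse _
        rw [hBval, PySem.Dict.getD_counter]
        have hkey : ((a.take n.toNat).map (nGt a)).count ((j:Nat):Int)
            = (a.take n.toNat).count ((ascD a)[(ascD a).length - 1 - j]'(by omega)) := by
          rw [List.count_eq_countP, List.countP_map, List.count_eq_countP]
          apply List.countP_congr
          intro x hx
          have hxa : x ∈ a := List.mem_of_mem_take hx
          have hiff := nGt_eq_iff a x hxa j hjL
          by_cases hxe : nGt a x = ((j:Nat):Int)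
          · simp only [Function.comp_apply, beq_iff_eq]
            simp [hxe, (hiff.mp hxe).symm]
          · simp only [Function.comp_apply, beq_iff_eq]
            simp [hxe]
            intro hc
            exact hxe (hiff.mpr hc)
        rw [hkey]
        simp
      · have hjn : ((j:Nat):Int) < n := by omega
        have hLj : ((ascD a).length : Int) ≤ ((j:Nat):Int) := by omega
        have hmem : ((j:Nat):Int) ∉ PySem.List.pyRange 0 (min n ((ascD a).length : Int)) 1 := by
          intro hc
          exact hjM ((PySem.List.mem_pyRange_one).mp hc).2
        rw [if_neg hmem]
        have hzero : ((a.take n.toNat).map (nGt a)).count ((j:Nat):Int) = 0 := by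
          rw [List.count_eq_zero]
          intro hc
          obtain ⟨x, hx, hxe⟩ := List.mem_map.mp hc
          have := (nGt_bounds a x (List.mem_of_mem_take hx)).2
          omega
        rw [PySem.Dict.getD_counter, hzero]
        simp
    · rw [List.getElem?_eq_none (by rw [hlenA]; omega),
          List.getElem?_eq_none (by rw [hlenB]; omega)]

-- ===== VERDICT (by name: the statement is the Claim_ definition above) =====
theorem solve_spec : Claim_equal_solve := by
  intro n a _ hpre
  unfold Spec_solve
  exact solve_eq_solve_alt n a hpre.1
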